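-- pv_equiv track=rewrite | github.com/Coding-Simba/bank-statement-converter-unified | fix-deadlinks.py | fix_social_media_links
-- ===== SOURCE A (Python) =====
-- def fix_social_media_links(content):
--     """Replace placeholder social media links with actual ones"""
--     replacements = {
--         '<a href="#" aria-label="Twitter">': '<a href="https://twitter.com/bankcsvconverter" aria-label="Twitter" target="_blank" rel="noopener">',
--         '<a href="#" aria-label="LinkedIn">': '<a href="https://linkedin.com/company/bankcsvconverter" aria-label="LinkedIn" target="_blank" rel="noopener">',
--         '<a href="#" aria-label="Facebook">': '<a href="https://facebook.com/bankcsvconverter" aria-label="Facebook" target="_blank" rel="noopener">',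
--         '<a aria-label="Twitter" href="#">': '<a aria-label="Twitter" href="https://twitter.com/bankcsvconverter" target="_blank" rel="noopener">',
--         '<a aria-label="LinkedIn" href="#">': '<a aria-label="LinkedIn" href="https://linkedin.com/company/bankcsvconverter" target="_blank" rel="noopener">',
--         '<a aria-label="Facebook" href="#">': '<a aria-label="Facebook" href="https://facebook.com/bankcsvconverter" target="_blank" rel="noopener">'
--     }
--
--     for old, new in replacements.items():
--         content = content.replace(old, new)
--     return content
-- ===== SOURCE B (Python) =====
-- import re
--
-- _REPLACEMENTS = {
--     '<a href="#" aria-label="Twitter">': '<a href="https://twitter.com/bankcsvconverter" aria-label="Twitter" target="_blank" rel="noopener">',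
--     '<a href="#" aria-label="LinkedIn">': '<a href="https://linkedin.com/company/bankcsvconverter" aria-label="LinkedIn" target="_blank" rel="noopener">',
--     '<a href="#" aria-label="Facebook">': '<a href="https://facebook.com/bankcsvconverter" aria-label="Facebook" target="_blank" rel="noopener">',
--     '<a aria-label="Twitter" href="#">': '<a aria-label="Twitter" href="https://twitter.com/bankcsvconverter" target="_blank" rel="noopener">',
--     '<a aria-label="LinkedIn" href="#">': '<a aria-label="LinkedIn" href="https://linkedin.com/company/bankcsvconverter" target="_blank" rel="noopener">',
--     '<a aria-label="Facebook" href="#">': '<a aria-label="Facebook" href="https://facebook.com/bankcsvconverter" target="_blank" rel="noopener">',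
-- }
-- _PATTERN = re.compile("|".join(re.escape(k) for k in _REPLACEMENTS))
--
-- def fix_social_media_links(content):
--     """Replace placeholder social media links with actual ones (single pass)."""
--     return _PATTERN.sub(lambda m: _REPLACEMENTS[m.group(0)], content)
-- ===== Notes on version B (the rewrite author's own statement) =====
-- stated objective: idiomatic
-- what changed: A makes six sequential full-string str.replace passes, one per placeholder; B compiles a single alternation regex over the re.escape'd placeholders and rewrites the string in one left-to-right pass via re.sub with a dict lookup on the matched text.
import Mathlib
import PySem

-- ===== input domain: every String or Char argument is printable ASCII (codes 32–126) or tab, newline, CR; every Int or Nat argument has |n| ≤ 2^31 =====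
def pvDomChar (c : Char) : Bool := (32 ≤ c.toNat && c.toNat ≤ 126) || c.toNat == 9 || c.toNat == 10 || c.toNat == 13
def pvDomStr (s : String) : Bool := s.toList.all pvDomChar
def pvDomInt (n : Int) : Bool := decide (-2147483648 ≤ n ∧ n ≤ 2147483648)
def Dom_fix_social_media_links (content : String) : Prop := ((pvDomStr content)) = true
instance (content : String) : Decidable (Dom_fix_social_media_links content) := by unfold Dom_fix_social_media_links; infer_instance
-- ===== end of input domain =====

-- B replaces A's six sequential full-string .replace passes by one single left-to-right scan
-- (a compiled alternation regex in Python) that substitutes each placeholder on sight; same result, one pass.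

-- ===== PORT A =====
-- the dict literal of A, as an association list in insertion order
def pvReplacementsA : List (String × String) :=
  [ ("<a href=\"#\" aria-label=\"Twitter\">", "<a href=\"https://twitter.com/bankcsvconverter\" aria-label=\"Twitter\" target=\"_blank\" rel=\"noopener\">"),
    ("<a href=\"#\" aria-label=\"LinkedIn\">", "<a href=\"https://linkedin.com/company/bankcsvconverter\" aria-label=\"LinkedIn\" target=\"_blank\" rel=\"noopener\">"),
    ("<a href=\"#\" aria-label=\"Facebook\">", "<a href=\"https://facebook.com/bankcsvconverter\" aria-label=\"Facebook\" target=\"_blank\" rel=\"noopener\">"),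
    ("<a aria-label=\"Twitter\" href=\"#\">", "<a aria-label=\"Twitter\" href=\"https://twitter.com/bankcsvconverter\" target=\"_blank\" rel=\"noopener\">"),
    ("<a aria-label=\"LinkedIn\" href=\"#\">", "<a aria-label=\"LinkedIn\" href=\"https://linkedin.com/company/bankcsvconverter\" target=\"_blank\" rel=\"noopener\">"),
    ("<a aria-label=\"Facebook\" href=\"#\">", "<a aria-label=\"Facebook\" href=\"https://facebook.com/bankcsvconverter\" target=\"_blank\" rel=\"noopener\">") ]

-- for old, new in replacements.items(): content = content.replace(old, new); return content
def fix_social_media_links (content : String) : String :=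
  pvReplacementsA.foldl (fun c p => PySem.Str.replace c p.1 p.2) content

-- ===== PORT B =====
-- B's placeholder→URL table, on the character-list level (the compiled alternation's branches in order)
def pvPairsB : List (List Char × List Char) :=
  [ ("<a href=\"#\" aria-label=\"Twitter\">".toList, "<a href=\"https://twitter.com/bankcsvconverter\" aria-label=\"Twitter\" target=\"_blank\" rel=\"noopener\">".toList),
    ("<a href=\"#\" aria-label=\"LinkedIn\">".toList, "<a href=\"https://linkedin.com/company/bankcsvconverter\" aria-label=\"LinkedIn\" target=\"_blank\" rel=\"noopener\">".toList),
    ("<a href=\"#\" aria-label=\"Facebook\">".toList, "<a href=\"https://facebook.com/bankcsvconverter\" aria-label=\"Facebook\" target=\"_blank\" rel=\"noopener\">".toList),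
    ("<a aria-label=\"Twitter\" href=\"#\">".toList, "<a aria-label=\"Twitter\" href=\"https://twitter.com/bankcsvconverter\" target=\"_blank\" rel=\"noopener\">".toList),
    ("<a aria-label=\"LinkedIn\" href=\"#\">".toList, "<a aria-label=\"LinkedIn\" href=\"https://linkedin.com/company/bankcsvconverter\" target=\"_blank\" rel=\"noopener\">".toList),
    ("<a aria-label=\"Facebook\" href=\"#\">".toList, "<a aria-label=\"Facebook\" href=\"https://facebook.com/bankcsvconverter\" target=\"_blank\" rel=\"noopener\">".toList) ]

-- one left-to-right scan: at each position try the alternatives in order (re.sub with an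
-- alternation of the escaped keys: leftmost match, first alternative wins), else copy the char
def pvScan (ps : List (List Char × List Char)) : List Char → List Char
  | [] => []
  | c :: t =>
    match ps.find? (fun p => p.1.isPrefixOf (c :: t)) with
    | some p => p.2 ++ pvScan ps (t.drop (p.1.length - 1))
    | none => c :: pvScan ps t
termination_by l => l.length
decreasing_by all_goals simp

def fix_social_media_links_alt (content : String) : String :=
  String.ofList (pvScan pvPairsB content.toList)

-- ===== PRECONDITION & SPEC =====
def Spec_fix_social_media_links (content : String) (out : String) : Prop := out = fix_social_media_links_alt content
instance (content : String) (out : String) : Decidable (Spec_fix_social_media_links content out) := by unfold Spec_fix_social_media_links; infer_instance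

-- ===== CLAIM (what is proved, stated in full; the proofs are below) =====
def Claim_equal_fix_social_media_links : Prop := ∀ (content : String), Dom_fix_social_media_links content → Spec_fix_social_media_links content (fix_social_media_links content)

-- ===== LEMMAS AND PROOFS =====

-- sequential-replace semantics, as a clean structural recursion (proved equal to PySem.Chars.replace below)
def pvRep (old new : List Char) : List Char → List Char
  | [] => []
  | c :: t =>
    if old.isPrefixOf (c :: t) then new ++ pvRep old new (t.drop (old.length - 1))
    else c :: pvRep old new t
termination_by l => l.length
decreasing_by all_goals simp

-- a token: starts with '<' and contains no further '<'
def pvOkTok (k : List Char) : Bool :=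
  match k with
  | c :: t => c = '<' && t.all (fun d => d ≠ '<')
  | [] => false

-- neither is a prefix of the other: occurrences cannot start at the same position
def pvMism (k w : List Char) : Bool := !(k.isPrefixOf w) && !(w.isPrefixOf k)

theorem pvMism_not_prefix {k w : List Char} (h : pvMism k w = true) (X : List Char) :
    ¬ k <+: w ++ X := by
  intro hp
  simp only [pvMism, Bool.and_eq_true, Bool.not_eq_true'] at h
  rcases List.prefix_or_prefix_of_prefix hp (List.prefix_append w X) with h1 | h1
  · exact absurd (List.isPrefixOf_iff_prefix.mpr h1) (by simp [h.1])
  · exact absurd (List.isPrefixOf_iff_prefix.mpr h1) (by simp [h.2])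

theorem pvOkTok_shape {k : List Char} (h : pvOkTok k = true) :
    ∃ t, k = '<' :: t ∧ ∀ d ∈ t, d ≠ '<' := by
  match k with
  | [] => simp [pvOkTok] at h
  | c :: t =>
    simp [pvOkTok] at h
    exact ⟨t, by simp [h.1], fun d hd => by simpa using h.2 d hd⟩

theorem replace_go_eq (old new : List Char) (hne : old ≠ []) :
    ∀ (fuel : Nat) (l acc : List Char), l.length ≤ fuel →
      PySem.Chars.replace.go old new fuel l acc = acc.reverse ++ pvRep old new l := by
  intro fuel
  induction fuel with
  | zero =>
    intro l acc hl
    have : l = [] := List.eq_nil_of_length_eq_zero (Nat.le_zero.mp hl)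
    subst this
    simp [PySem.Chars.replace.go, pvRep]
  | succ fuel ih =>
    intro l acc hl
    match l with
    | [] => simp [PySem.Chars.replace.go, pvRep]
    | c :: t =>
      rw [PySem.Chars.replace.go]
      by_cases hp : old.isPrefixOf (c :: t)
      · rw [if_pos hp]
        obtain ⟨m, hm⟩ : ∃ m, old.length = m + 1 :=
          ⟨old.length - 1, by cases old with
            | nil => exact absurd rfl hne
            | cons a b => simp⟩
        have hdrop : List.drop old.length (c :: t) = t.drop (old.length - 1) := by
          rw [hm]; simp [List.drop_succ_cons]
        rw [hdrop, ih _ _ (by simp at hl ⊢; omega)]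
        rw [pvRep, if_pos hp]
        simp
      · rw [if_neg hp, ih t (c :: acc) (by simpa using hl)]
        rw [pvRep, if_neg hp]
        simp

theorem replace_eq_pvRep (s old new : List Char) (hne : old ≠ []) :
    PySem.Chars.replace s old new = pvRep old new s := by
  unfold PySem.Chars.replace
  rw [if_neg (by simpa using hne)]
  simpa using replace_go_eq old new hne s.length s [] le_rfl

theorem pvRep_nil (old new : List Char) : pvRep old new [] = [] := by simp [pvRep]

theorem pvRep_cons_neg {old : List Char} (new : List Char) {c : Char} {t : List Char}
    (h : ¬ old <+: (c :: t)) : pvRep old new (c :: t) = c :: pvRep old new t := by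
  rw [pvRep, if_neg (by simpa [List.isPrefixOf_iff_prefix] using h)]

theorem pvRep_cons_pos {old : List Char} (new : List Char) {c : Char} {t : List Char}
    (h : old <+: (c :: t)) :
    pvRep old new (c :: t) = new ++ pvRep old new (t.drop (old.length - 1)) := by
  rw [pvRep, if_pos (by simpa [List.isPrefixOf_iff_prefix] using h)]

theorem pvRep_block {old new L X : List Char} {kt : List Char}
    (hok : old = '<' :: kt) (hL : ∀ d ∈ L, d ≠ '<') :
    pvRep old new (L ++ X) = L ++ pvRep old new X := by
  induction L with
  | nil => simp
  | cons d L ih =>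
    have hne : ¬ old <+: (d :: (L ++ X)) := by
      intro hp
      rw [hok, List.cons_prefix_cons] at hp
      exact hL d (by simp) hp.1.symm
    rw [List.cons_append, pvRep_cons_neg new hne, ih (fun d hd => hL d (by simp [hd]))]
    simp

theorem pvRep_match {old new X : List Char} {kt : List Char} (hok : old = '<' :: kt) :
    pvRep old new (old ++ X) = new ++ pvRep old new X := by
  rw [hok, List.cons_append, pvRep_cons_pos new (by rw [← List.cons_append, ← hok]; exact List.prefix_append _ _)]
  simp

-- rep can only change a '<'-free prefix by making it start with '<'
theorem pvRep_struct {old new : List Char} {vt : List Char}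
    (hv : new = '<' :: vt) :
    ∀ (t p : List Char), (∀ d ∈ p, d ≠ '<') → p <+: pvRep old new t → p <+: t := by
  intro t
  induction t with
  | nil =>
    intro p _ hp
    simpa [pvRep] using hp
  | cons c t ih =>
    intro p hfree hp
    by_cases hpre : old <+: (c :: t)
    · rw [pvRep_cons_pos new hpre, hv] at hp
      match p, hp with
      | [], _ => exact List.nil_prefix
      | d :: p', hp =>
        rw [List.cons_append, List.cons_prefix_cons] at hp
        exact absurd hp.1 (hfree d (by simp))
    · rw [pvRep_cons_neg new hpre] at hp
      match p, hp with
      | [], _ => exact List.nil_prefix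
      | d :: p', hp =>
        rw [List.cons_prefix_cons] at hp ⊢
        exact ⟨hp.1, ih p' (fun d hd => hfree d (by simp [hd])) hp.2⟩

theorem pvScan_nil (ps : List (List Char × List Char)) : pvScan ps [] = [] := by simp [pvScan]

theorem pvScan_empty (s : List Char) : pvScan [] s = s := by
  induction s with
  | nil => simp [pvScan]
  | cons c t ih => rw [pvScan]; simpa using ih

theorem pvScan_block {ps : List (List Char × List Char)} {L X : List Char}
    (hps : ∀ p ∈ ps, pvOkTok p.1 = true) (hL : ∀ d ∈ L, d ≠ '<') :
    pvScan ps (L ++ X) = L ++ pvScan ps X := by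
  induction L with
  | nil => simp
  | cons d L ih =>
    have hnone : ps.find? (fun p => p.1.isPrefixOf (d :: (L ++ X))) = none := by
      rw [List.find?_eq_none]
      intro p hp hpre
      obtain ⟨q, hq, _⟩ := pvOkTok_shape (hps p hp)
      rw [hq, List.isPrefixOf_iff_prefix, List.cons_prefix_cons] at hpre
      exact hL d (by simp) hpre.1.symm
    rw [List.cons_append, pvScan, hnone, ih (fun d hd => hL d (by simp [hd]))]
    simp

theorem find?_congr_pv {α : Type} {p q : α → Bool} {l : List α}
    (h : ∀ a ∈ l, p a = q a) : l.find? p = l.find? q := by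
  induction l with
  | nil => rfl
  | cons a l ih =>
    simp only [List.find?_cons]
    rw [h a (by simp)]
    cases q a <;> simp [ih (fun a ha => h a (by simp [ha]))]

theorem pvScan_value {ps : List (List Char × List Char)} {v Y : List Char}
    (hps : ∀ p ∈ ps, pvOkTok p.1 = true) (hv : pvOkTok v = true)
    (hmv : ∀ p ∈ ps, pvMism p.1 v = true) :
    pvScan ps (v ++ Y) = v ++ pvScan ps Y := by
  obtain ⟨vt, hvt, hfree⟩ := pvOkTok_shape hv
  have hnone : ps.find? (fun p => p.1.isPrefixOf ('<' :: (vt ++ Y))) = none := by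
    rw [List.find?_eq_none]
    intro p hp hpre
    refine pvMism_not_prefix (hmv p hp) Y ?_
    rw [hvt, List.cons_append]
    exact List.isPrefixOf_iff_prefix.mp hpre
  rw [hvt, List.cons_append, pvScan, hnone, pvScan_block hps hfree]
  simp

theorem pvMain {k v : List Char} {ps : List (List Char × List Char)}
    (hk : pvOkTok k = true) (hv : pvOkTok v = true)
    (hps : ∀ p ∈ ps, pvOkTok p.1 = true)
    (hmv : ∀ p ∈ ps, pvMism p.1 v = true) :
    ∀ s, pvScan ps (pvRep k v s) = pvScan ((k, v) :: ps) s := by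
  obtain ⟨kt, hkt, hktfree⟩ := pvOkTok_shape hk
  suffices H : ∀ n s, s.length ≤ n → pvScan ps (pvRep k v s) = pvScan ((k, v) :: ps) s by
    intro s; exact H s.length s le_rfl
  intro n
  induction n with
  | zero =>
    intro s hs
    have : s = [] := List.eq_nil_of_length_eq_zero (Nat.le_zero.mp hs)
    subst this
    simp [pvRep_nil, pvScan_nil]
  | succ n ih =>
    intro s hs
    match s with
    | [] => simp [pvRep_nil, pvScan_nil]
    | c :: t =>
      by_cases hkp : k <+: (c :: t)
      · have hc : c = '<' ∧ kt <+: t := by rw [hkt, List.cons_prefix_cons] at hkp; exact ⟨hkp.1.symm, hkp.2⟩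
        obtain ⟨X, hX⟩ := hc.2
        have hrep : pvRep k v (c :: t) = v ++ pvRep k v X := by
          have hs' : (c :: t) = k ++ X := by rw [hkt, hc.1, ← hX]; simp
          rw [hs', pvRep_match hkt]
        have hdropt : t.drop (k.length - 1) = X := by rw [hkt, ← hX]; simp
        have hlen : X.length ≤ n := by
          have : t.length ≤ n := by simpa using hs
          have : X.length ≤ t.length := by rw [← hX]; simp
          omega
        rw [hrep, pvScan_value hps hv hmv, ih X hlen]
        conv_rhs => rw [pvScan]
        rw [List.find?_cons_of_pos (by simpa [List.isPrefixOf_iff_prefix] using hkp)]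
        simp [hdropt]
      · have hrep : pvRep k v (c :: t) = c :: pvRep k v t := pvRep_cons_neg v hkp
        have heq : ∀ p ∈ ps, (p.1.isPrefixOf (c :: pvRep k v t)) = (p.1.isPrefixOf (c :: t)) := by
          intro p hp
          obtain ⟨q, hq, hqfree⟩ := pvOkTok_shape (hps p hp)
          rw [Bool.eq_iff_iff, List.isPrefixOf_iff_prefix, List.isPrefixOf_iff_prefix]
          constructor
          · intro h
            rw [hq, List.cons_prefix_cons] at h ⊢
            exact ⟨h.1, pvRep_struct (pvOkTok_shape hv).choose_spec.1 t q hqfree h.2⟩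
          · intro h
            rw [hq, List.cons_prefix_cons] at h ⊢
            obtain ⟨rest, hrest⟩ := h.2
            refine ⟨h.1, ?_⟩
            rw [← hrest, pvRep_block hkt hqfree]
            exact List.prefix_append _ _
        have hfind := find?_congr_pv heq
        have hknot : ¬ (k.isPrefixOf (c :: t) = true) := by
          simpa [List.isPrefixOf_iff_prefix] using hkp
        cases hfo : ps.find? (fun p => p.1.isPrefixOf (c :: t)) with
        | none =>
          rw [hrep]
          conv_lhs => rw [pvScan]
          rw [hfind, hfo, ih t (by simpa using hs)]
          conv_rhs => rw [pvScan]
          rw [List.find?_cons_of_neg (p := fun (p : List Char × List Char) => p.1.isPrefixOf (c :: t)) hknot, hfo]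
        | some p =>
          have hpmem := List.mem_of_find?_eq_some hfo
          have hppre : p.1 <+: (c :: t) := by
            simpa [List.isPrefixOf_iff_prefix] using List.find?_some hfo
          obtain ⟨q, hq, hqfree⟩ := pvOkTok_shape (hps p hpmem)
          have hc : c = '<' ∧ q <+: t := by rw [hq, List.cons_prefix_cons] at hppre; exact ⟨hppre.1.symm, hppre.2⟩
          obtain ⟨rest, hrest⟩ := hc.2
          have hrept : pvRep k v t = q ++ pvRep k v rest := by
            rw [← hrest]; exact pvRep_block hkt hqfree
          have hdrop1 : (pvRep k v t).drop (p.1.length - 1) = pvRep k v rest := by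
            rw [hrept, hq]; simp
          have hdrop2 : t.drop (p.1.length - 1) = rest := by
            rw [← hrest, hq]; simp
          have hlen : rest.length ≤ n := by
            have h1 : t.length ≤ n := by simpa using hs
            have h2 : rest.length ≤ t.length := by rw [← hrest]; simp
            omega
          rw [hrep]
          conv_lhs => rw [pvScan]
          rw [hfind, hfo]
          conv_rhs => rw [pvScan]
          rw [List.find?_cons_of_neg (p := fun (p : List Char × List Char) => p.1.isPrefixOf (c :: t)) hknot, hfo]
          simp [hdrop1, hdrop2, ih rest hlen]

theorem pvFold (ps : List (List Char × List Char))
    (h1 : ∀ p ∈ ps, pvOkTok p.1 = true ∧ pvOkTok p.2 = true)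
    (h2 : List.Pairwise (fun q p => pvMism p.1 q.2 = true) ps) :
    ∀ s, List.foldl (fun cs p => pvRep p.1 p.2 cs) s ps = pvScan ps s := by
  induction ps with
  | nil => intro s; simp [pvScan_empty]
  | cons kv ps ih =>
    intro s
    rw [List.foldl_cons, ih (fun p hp => h1 p (by simp [hp])) h2.of_cons]
    exact pvMain (h1 kv (by simp)).1 (h1 kv (by simp)).2
      (fun p hp => (h1 p (by simp [hp])).1)
      (fun p hp => (List.pairwise_cons.mp h2).1 p hp) s

theorem pvFold_toList (l : List (String × String)) (hne : ∀ p ∈ l, p.1.toList ≠ []) :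
    ∀ s : String,
      (l.foldl (fun c p => PySem.Str.replace c p.1 p.2) s).toList
        = List.foldl (fun cs p => pvRep p.1 p.2 cs) s.toList (l.map (fun p => (p.1.toList, p.2.toList))) := by
  induction l with
  | nil => intro s; rfl
  | cons p l ih =>
    intro s
    rw [List.foldl_cons, List.map_cons, List.foldl_cons,
      ih (fun q hq => hne q (by simp [hq])) (PySem.Str.replace s p.1 p.2),
      PySem.Str.toList_replace, replace_eq_pvRep _ _ _ (hne p (by simp))]

-- ===== VERDICT (by name: the statement is the Claim_ definition above) =====
theorem fix_social_media_links_spec : Claim_equal_fix_social_media_links := by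
  intro content _
  unfold Spec_fix_social_media_links fix_social_media_links_alt
  have key : (fix_social_media_links content).toList = pvScan pvPairsB content.toList := by
    rw [fix_social_media_links, pvFold_toList pvReplacementsA (by decide) content,
      show pvReplacementsA.map (fun p => (p.1.toList, p.2.toList)) = pvPairsB from rfl]
    exact pvFold pvPairsB (by decide) (by decide) content.toList
  rw [← key, String.ofList_toList]
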